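-- pv_equiv track=rewrite | github.com/YuriHe/review_basic | stubs/str.py | generate_sentences
-- ===== SOURCE A (Python) =====
-- from itertools import product
--
-- def generate_sentences(wordSet, sentence):
--     # 将 wordSet 转换为小写，并建立变位词组字典
--     wordSet = [word.lower() for word in wordSet]
--     anagram_dict = {}
--     for word in wordSet:
--         key = ''.join(sorted(word)) # 按字母排序作为key
--         anagram_dict.setdefault(key, []).append(word)
--
--     # 分割句子
--     words = sentence.lower().split()
--
--     # 对每个单词找到可能的替换项
--     replacements = []
--     for word in words:
--         key = ''.join(sorted(word))
--         replacements.append(anagram_dict.get(key, [word]))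
--
--     # 使用笛卡尔积生成所有可能组合
--     all_sentences = [' '.join(combination) for combination in product(*replacements)]
--
--     return all_sentences
--
-- wordSet = ["listen", "silent", "it", "is"]
--
-- sentence = "listen it is silent"
-- ===== SOURCE B (Python) =====
-- def generate_sentences(wordSet, sentence):
--     lowered = [w.lower() for w in wordSet]
--
--     def expand(words):
--         key = sorted(words[0])
--         cands = [w for w in lowered if sorted(w) == key] or [words[0]]
--         if len(words) == 1:
--             return cands
--         rest = expand(words[1:])
--         return [c + ' ' + t for c in cands for t in rest]
--
--     words = sentence.lower().split()
--     return [''] if not words else expand(words)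
-- ===== Notes on version B (the rewrite author's own statement) =====
-- stated objective: alternative
-- what changed: Drops the anagram dictionary and the itertools.product/tuple-join pipeline: B finds each word's candidates by filtering the lowered wordSet on the spot and builds the sentences by recursion over the word positions, concatenating strings directly (no intermediate word tuples, no join at the end).
import Mathlib
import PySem

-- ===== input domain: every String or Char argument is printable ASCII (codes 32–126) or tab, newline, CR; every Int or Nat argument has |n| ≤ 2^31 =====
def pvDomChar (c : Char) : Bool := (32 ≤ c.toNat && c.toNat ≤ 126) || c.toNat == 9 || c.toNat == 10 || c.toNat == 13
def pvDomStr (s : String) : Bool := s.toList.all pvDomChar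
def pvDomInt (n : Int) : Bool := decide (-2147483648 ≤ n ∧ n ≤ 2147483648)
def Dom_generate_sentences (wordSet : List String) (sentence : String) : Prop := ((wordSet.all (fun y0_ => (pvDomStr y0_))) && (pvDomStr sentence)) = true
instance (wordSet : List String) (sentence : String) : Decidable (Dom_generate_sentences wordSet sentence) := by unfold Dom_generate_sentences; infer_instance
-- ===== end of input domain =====

-- B drops A's anagram dictionary and itertools.product pipeline: it filters the lowered wordSet
-- per sentence word and recursively concatenates the sentences position by position;
-- objective: alternative (same results, different organisation, no speed claim).

-- the sorted-letters key ''.join(sorted(w)) / sorted(w), used by both ports (as a list of chars)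
def sortKey (w : String) : List Char := PySem.List.sorted w.toList (fun c => c) false

-- ===== PORT A =====
-- itertools.product(*replacements) as a list of word-lists (rightmost factor varies fastest)
def pyProductA (ls : List (List String)) : List (List String) :=
  match ls with
  | [] => [[]]
  | l :: rest => l.flatMap (fun x => (pyProductA rest).map (fun t => x :: t))

def generate_sentences (wordSet : List String) (sentence : String) : List String :=
  let ws := wordSet.map (fun word => PySem.Str.lower word)
  let anagram_dict := ws.foldl
    (fun d word => d.modify (sortKey word) [] (fun l => l ++ [word]))
    PySem.Dict.empty
  let words := PySem.Str.split₀ (PySem.Str.lower sentence)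
  let replacements := words.foldl
    (fun acc word => acc ++ [anagram_dict.getD (sortKey word) [word]]) []
  (pyProductA replacements).map (fun combination => PySem.Str.join " " combination)

-- ===== PORT B =====
-- '[w for w in lowered if sorted(w) == key] or [words[0]]'
def altCands (lowered : List String) (word : String) : List String :=
  let key := sortKey word
  let cs := lowered.filter (fun w => sortKey w == key)
  if cs = [] then [word] else cs

-- the recursive 'expand' (Python only calls it on nonempty lists; the [] branch is unreachable)
def altExpand (lowered : List String) : List String → List String
  | [] => []
  | [word] => altCands lowered word
  | word :: rest₀ :: rest =>
      let cands := altCands lowered word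
      let tails := altExpand lowered (rest₀ :: rest)
      cands.flatMap (fun c => tails.map (fun t => c ++ " " ++ t))

def generate_sentences_alt (wordSet : List String) (sentence : String) : List String :=
  let lowered := wordSet.map (fun w => PySem.Str.lower w)
  let words := PySem.Str.split₀ (PySem.Str.lower sentence)
  if words = [] then [""] else altExpand lowered words

-- ===== PRECONDITION & SPEC =====
def Spec_generate_sentences (wordSet : List String) (sentence : String) (out : List String) : Prop := out = generate_sentences_alt wordSet sentence
instance (wordSet : List String) (sentence : String) (out : List String) : Decidable (Spec_generate_sentences wordSet sentence out) := by unfold Spec_generate_sentences; infer_instance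

-- ===== CLAIM (what is proved, stated in full; the proofs are below) =====
def Claim_equal_generate_sentences : Prop := ∀ (wordSet : List String) (sentence : String), Dom_generate_sentences wordSet sentence → Spec_generate_sentences wordSet sentence (generate_sentences wordSet sentence)

-- ===== LEMMAS AND PROOFS =====

-- A's dict lookup with default [word] is B's filter-or-default candidate list
theorem dict_lookup_eq_cands (ws : List String) (word : String) :
    (ws.foldl (fun d w => d.modify (sortKey w) [] (fun l => l ++ [w])) PySem.Dict.empty).getD
        (sortKey word) [word]
      = altCands ws word := by
  set c := sortKey word with hc
  set d := ws.foldl (fun d w => d.modify (sortKey w) [] (fun l => l ++ [w])) PySem.Dict.empty with hd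
  have hfold : d = (ws.map (fun w => (sortKey w, w))).foldl
      (fun d p => d.modify p.1 [] (fun l => l ++ [p.2])) PySem.Dict.empty := by
    rw [hd, List.foldl_map]
  have hget0 : d.getD c [] = ws.filter (fun w => sortKey w == c) := by
    rw [hfold, PySem.Dict.getD_foldl_modify_append]
    simp [List.filter_map, Function.comp_def]
  have hkeys : ∀ k, k ∈ d.keys ↔ k ∈ ws.map sortKey := by
    intro k
    rw [hfold, PySem.Dict.keys_foldl_modify_key, PySem.Dict.keys_empty]
    have h2 : (ws.map (fun w => (sortKey w, w))).map (fun p : List Char × String => p.1)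
        = ws.map sortKey := by
      simp [List.map_map, Function.comp_def]
    rw [h2, show PySem.Set.update ([] : PySem.Set (List Char)) (ws.map sortKey)
        = PySem.Set.ofList (ws.map sortKey) from rfl, PySem.Set.mem_ofList]
  by_cases hf : ws.filter (fun w => sortKey w == c) = []
  · have hnm : c ∉ d.keys := by
      rw [hkeys]
      intro hmem
      obtain ⟨w, hw, hwk⟩ := List.mem_map.mp hmem
      have : w ∈ ws.filter (fun w => sortKey w == c) := by
        simp [List.mem_filter, hw, hwk]
      simp [hf] at this
    have hcf : d.contains c = false := by
      cases h : d.contains c with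
      | false => rfl
      | true => exact absurd ((PySem.Dict.contains_iff_mem_keys d c).mp h) hnm
    rw [PySem.Dict.getD_of_not_contains _ _ hcf]
    simp only [altCands]
    rw [if_pos hf]
  · have hm : c ∈ d.keys := by
      rw [hkeys]
      obtain ⟨w, hw⟩ := List.exists_mem_of_ne_nil _ hf
      have hw' := List.mem_filter.mp hw
      exact List.mem_map.mpr ⟨w, hw'.1, by simpa using hw'.2⟩
    have hsome : ∃ v, d.get? c = some v := by
      have := PySem.Dict.get?_eq_none_iff_not_mem_keys (d := d) (k := c)
      cases h : d.get? c with
      | none => exact absurd hm (this.mp h)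
      | some v => exact ⟨v, rfl⟩
    obtain ⟨v, hv⟩ := hsome
    rw [PySem.Dict.getD_eq_get?_getD, hv]
    rw [PySem.Dict.getD_eq_get?_getD, hv] at hget0
    simp only [Option.getD_some] at hget0 ⊢
    simp only [altCands]
    rw [if_neg hf]
    exact hget0

-- every tuple produced by product of a nonempty list of factors is nonempty
theorem pyProductA_mem_ne_nil (r : List String) (rs : List (List String)) :
    ∀ t ∈ pyProductA (r :: rs), t ≠ [] := by
  intro t ht
  simp only [pyProductA, List.mem_flatMap, List.mem_map] at ht
  obtain ⟨x, _, t', _, rfl⟩ := ht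
  simp

-- ' '.join on a cons with nonempty tail
theorem join_cons_ne_nil (x : String) (t : List String) (h : t ≠ []) :
    PySem.Str.join " " (x :: t) = x ++ " " ++ PySem.Str.join " " t := by
  apply String.toList_injective
  obtain ⟨y, t', rfl⟩ := List.exists_cons_of_ne_nil h
  simp [PySem.Str.join, PySem.Chars.join, List.intercalate]

theorem join_singleton (x : String) : PySem.Str.join " " [x] = x := by
  apply String.toList_injective
  simp [PySem.Str.join, PySem.Chars.join, List.intercalate]

theorem pyProductA_cons (l : List String) (rest : List (List String)) :
    pyProductA (l :: rest) = l.flatMap (fun x => (pyProductA rest).map (fun t => x :: t)) := rfl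

theorem altExpand_cons₂ (lowered : List String) (w w2 : String) (ws2 : List String) :
    altExpand lowered (w :: w2 :: ws2)
      = (altCands lowered w).flatMap
          (fun c => (altExpand lowered (w2 :: ws2)).map (fun t => c ++ " " ++ t)) := rfl

-- joining the product of the candidate lists is B's recursive expansion
theorem product_join_eq_expand (lowered : List String) :
    ∀ words : List String, words ≠ [] →
      (pyProductA (words.map (altCands lowered))).map (fun c => PySem.Str.join " " c)
        = altExpand lowered words := by
  intro words
  induction words with
  | nil => intro h; exact absurd rfl h
  | cons w ws ih =>
    intro _
    cases ws with
    | nil =>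
      show (pyProductA [altCands lowered w]).map (fun c => PySem.Str.join " " c)
          = altCands lowered w
      rw [pyProductA_cons]
      have : ∀ l : List String,
          (l.flatMap (fun x => (pyProductA []).map (fun t => x :: t))).map
            (fun c => PySem.Str.join " " c) = l := by
        intro l
        induction l with
        | nil => rfl
        | cons y l ihl =>
            simp only [pyProductA, List.flatMap_cons, List.map_cons, List.map_nil,
              List.singleton_append, join_singleton] at ihl ⊢
            rw [ihl]
      exact this (altCands lowered w)
    | cons w2 ws2 =>
      have hne : w2 :: ws2 ≠ [] := by simp
      have hP := pyProductA_mem_ne_nil (altCands lowered w2) (List.map (altCands lowered) ws2)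
      rw [List.map_cons, pyProductA_cons, altExpand_cons₂, ← ih hne, List.map_flatMap]
      have hfg : (fun x => ((pyProductA (List.map (altCands lowered) (w2 :: ws2))).map
              (fun t => x :: t)).map (fun c => PySem.Str.join " " c))
          = (fun x => ((pyProductA (List.map (altCands lowered) (w2 :: ws2))).map
              (fun c => PySem.Str.join " " c)).map (fun t => x ++ " " ++ t)) := by
        funext x
        simp only [List.map_map, Function.comp_def]
        apply List.map_congr_left
        intro t ht
        exact join_cons_ne_nil x t (by simpa using hP t (by simpa using ht))
      rw [hfg]

theorem generate_sentences_eq (wordSet : List String) (sentence : String) :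
    generate_sentences wordSet sentence = generate_sentences_alt wordSet sentence := by
  unfold generate_sentences generate_sentences_alt
  simp only [PySem.List.foldl_append_singleton_eq_map, List.nil_append]
  have hrep : (PySem.Str.split₀ (PySem.Str.lower sentence)).map
      (fun word => ((wordSet.map (fun w => PySem.Str.lower w)).foldl
        (fun d w => d.modify (sortKey w) [] (fun l => l ++ [w])) PySem.Dict.empty).getD
          (sortKey word) [word])
      = (PySem.Str.split₀ (PySem.Str.lower sentence)).map
          (altCands (wordSet.map (fun w => PySem.Str.lower w))) := by
    apply List.map_congr_left
    intro word _
    exact dict_lookup_eq_cands (wordSet.map (fun w => PySem.Str.lower w)) word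
  rw [hrep]
  cases hwords : PySem.Str.split₀ (PySem.Str.lower sentence) with
  | nil =>
    have hjn : PySem.Str.join " " ([] : List String) = "" := by
      apply String.toList_injective
      simp [PySem.Str.join, PySem.Chars.join, List.intercalate]
    simp [pyProductA, hjn]
  | cons w ws =>
    rw [if_neg (by simp)]
    exact product_join_eq_expand _ (w :: ws) (by simp)

-- ===== VERDICT (by name: the statement is the Claim_ definition above) =====
theorem generate_sentences_spec : Claim_equal_generate_sentences := by
  intro wordSet sentence _
  exact generate_sentences_eq wordSet sentence
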